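-- pv_equiv track=rewrite | github.com/daniel-reich/ubiquitous-fiesta | vC4P2jGR6wxED7MBL_12.py | larger_than_right
-- ===== SOURCE A (Python) =====
-- def larger_than_right(lst):
--   fin = []
--   for k,v in enumerate(lst):
--     if k == len(lst)-1:
--       fin.append(lst[k])
--       break
--     if v > max(lst[k+1:]):
--       fin.append(lst[k])
--   return fin
-- ===== SOURCE B (Python) =====
-- def larger_than_right(lst):
--   out = []
--   best = None
--   for v in reversed(lst):
--     if best is None or v > best:
--       out.append(v)
--       best = v
--   out.reverse()
--   return out
-- ===== Notes on version B (the rewrite author's own statement) =====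
-- stated objective: faster
-- what changed: Replaced the per-index max(lst[k+1:]) rescans with a single right-to-left pass that tracks the running suffix maximum and collects the leaders, reversing once at the end.
import Mathlib
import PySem

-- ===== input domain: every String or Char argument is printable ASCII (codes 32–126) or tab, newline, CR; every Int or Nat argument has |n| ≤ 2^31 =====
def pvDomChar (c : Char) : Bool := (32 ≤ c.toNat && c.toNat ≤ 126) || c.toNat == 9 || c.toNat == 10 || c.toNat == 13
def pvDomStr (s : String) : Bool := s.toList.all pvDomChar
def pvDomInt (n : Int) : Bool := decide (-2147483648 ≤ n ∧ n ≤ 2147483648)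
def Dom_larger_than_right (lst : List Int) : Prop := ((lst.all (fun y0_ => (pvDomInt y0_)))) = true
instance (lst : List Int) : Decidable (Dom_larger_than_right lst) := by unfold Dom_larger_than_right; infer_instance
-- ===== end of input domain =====

-- B replaces A's per-index max(lst[k+1:]) rescans by one right-to-left pass tracking the running suffix maximum (objective: faster).

-- ===== PORT A =====
-- the 'for k,v in enumerate(lst)' loop with its break, carried accumulator 'fin'
def pvALoop (lst : List Int) : List (Int × Int) → List Int → List Int
  | [], fin => fin
  | (k, v) :: rest, fin =>
    if k = (lst.length : Int) - 1 then
      fin ++ [PySem.List.pyGetD lst k 0]          -- lst[k]; k is always in range here, then 'break'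
    else
      match PySem.List.max? (PySem.List.slice lst (some (k + 1)) none) (fun y => y) with
      | none => fin                                -- unreachable: the slice is nonempty when k < len(lst)-1
      | some m =>
        pvALoop lst rest (if v > m then fin ++ [PySem.List.pyGetD lst k 0] else fin)

def larger_than_right (lst : List Int) : List Int :=
  pvALoop lst (PySem.List.enumerate lst 0) []

-- ===== PORT B =====
-- one step of the 'for v in reversed(lst)' loop; state = (out, best)
def pvBStep (st : List Int × Option Int) (v : Int) : List Int × Option Int :=
  match st.2 with
  | none => (st.1 ++ [v], some v)
  | some b => if v > b then (st.1 ++ [v], some v) else st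

def larger_than_right_alt (lst : List Int) : List Int :=
  (lst.reverse.foldl pvBStep ([], none)).1.reverse

-- ===== PRECONDITION & SPEC =====
def Spec_larger_than_right (lst : List Int) (out : List Int) : Prop := out = larger_than_right_alt lst
instance (lst : List Int) (out : List Int) : Decidable (Spec_larger_than_right lst out) := by unfold Spec_larger_than_right; infer_instance

-- ===== CLAIM (what is proved, stated in full; the proofs are below) =====
def Claim_equal_larger_than_right : Prop := ∀ (lst : List Int), Dom_larger_than_right lst → Spec_larger_than_right lst (larger_than_right lst)

-- ===== LEMMAS AND PROOFS =====

-- the common mathematical object: the leaders of a list, built by structural recursion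
def pvL : List Int → List Int
  | [] => []
  | x :: xs =>
    match pvL xs with
    | [] => [x]
    | y :: r => if x > y then x :: y :: r else y :: r

theorem pvFoldlMaxComm (t : List Int) (a b : Int) :
    t.foldl max (max a b) = max a (t.foldl max b) := by
  induction t generalizing b with
  | nil => rfl
  | cons c t ih =>
    simp only [List.foldl_cons]
    rw [max_assoc, ih]

theorem pvL_head (w : Int) (t : List Int) : ∃ r, pvL (w :: t) = (t.foldl max w) :: r := by
  induction t generalizing w with
  | nil => exact ⟨[], rfl⟩
  | cons c t ih =>
    obtain ⟨r, hr⟩ := ih c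
    rw [show pvL (w :: c :: t) = (match pvL (c :: t) with
          | [] => [w] | y :: r => if w > y then w :: y :: r else y :: r) from rfl, hr]
    rw [show (c :: t).foldl max w = max w (t.foldl max c) from by
      simpa using pvFoldlMaxComm t w c]
    by_cases h : w > t.foldl max c
    · exact ⟨(t.foldl max c) :: r, by simp [h, max_eq_left (le_of_lt h)]⟩
    · exact ⟨r, by simp [h, max_eq_right (not_lt.mp h)]⟩

theorem pvBfold (xs : List Int) :
    xs.reverse.foldl pvBStep ([], none) = ((pvL xs).reverse, (pvL xs).head?) := by
  induction xs with
  | nil => rfl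
  | cons x xs ih =>
    rw [List.reverse_cons, List.foldl_append, ih]
    cases h : pvL xs with
    | nil => simp [pvL, h, pvBStep]
    | cons y r =>
      simp only [pvL, h, List.head?, List.foldl_cons, List.foldl_nil]
      by_cases hxy : x > y
      · simp [pvBStep, hxy]
      · simp [pvBStep, hxy]

theorem pvAlt_eq_pvL (xs : List Int) : larger_than_right_alt xs = pvL xs := by
  unfold larger_than_right_alt
  rw [pvBfold]
  exact List.reverse_reverse _

theorem pvGet_mid (pre suf : List Int) (v : Int) :
    PySem.List.pyGetD (pre ++ v :: suf) ((pre.length : Int)) 0 = v := by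
  rw [PySem.List.pyGetD_natCast]
  simp

theorem pvALoop_eq (suf : List Int) : ∀ (pre fin : List Int),
    pvALoop (pre ++ suf) (PySem.List.enumerate suf (pre.length : Int)) fin
      = fin ++ pvL suf := by
  induction suf with
  | nil => intro pre fin; simp [pvALoop, pvL, PySem.List.enumerate]
  | cons v suf ih =>
    intro pre fin
    rw [PySem.List.enumerate_cons]
    cases suf with
    | nil =>
      have hk : (pre.length : Int) = ((pre ++ [v]).length : Int) - 1 := by
        simp
      simp only [pvALoop, hk]
      rw [← hk, pvGet_mid]
      rfl
    | cons w t =>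
      have hk : ¬ ((pre.length : Int) = ((pre ++ v :: w :: t).length : Int) - 1) := by
        simp only [List.length_append, List.length_cons]
        push_cast
        omega
      simp only [pvALoop, if_neg hk]
      have hslice : PySem.List.slice (pre ++ v :: w :: t) (some ((pre.length : Int) + 1)) none
          = w :: t := by
        rw [show ((pre.length : Int) + 1) = (((pre.length + 1 : Nat)) : Int) from by push_cast; ring]
        rw [PySem.List.slice_from_natCast]
        rw [show pre.length + 1 = (pre ++ [v]).length from by simp]
        rw [show pre ++ v :: w :: t = (pre ++ [v]) ++ w :: t from by simp]
        exact List.drop_left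
      rw [hslice, PySem.List.max?_id_cons]
      obtain ⟨r, hr⟩ := pvL_head w t
      have harg : (pre.length : Int) + 1 = ((pre ++ [v]).length : Int) := by simp
      have hlst : pre ++ v :: w :: t = (pre ++ [v]) ++ w :: t := by simp
      simp only [pvGet_mid]
      rw [hlst, harg, ih (pre ++ [v])]
      rw [show pvL (v :: w :: t) = (match pvL (w :: t) with
            | [] => [v] | y :: r => if v > y then v :: y :: r else y :: r) from rfl, hr]
      by_cases hv : v > t.foldl max w
      · simp [hv]
      · simp [hv]

-- ===== VERDICT (by name: the statement is the Claim_ definition above) =====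
theorem larger_than_right_spec : Claim_equal_larger_than_right := by
  intro lst _
  unfold Spec_larger_than_right larger_than_right
  rw [pvAlt_eq_pvL]
  simpa using pvALoop_eq lst [] []
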